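-- pv_equiv track=rewrite | github.com/mgp123/lossy-compression | jpeg/run_length_encoding.py | zig_zag_index
-- ===== SOURCE A (Python) =====
-- def zig_zag_index(nx,ny):
--     x = []
--     y = []
--     current_x = 0
--     current_y = 0
--     direction = 1
--
--     while current_x <nx and current_y <ny:
--         x.append(current_x)
--         y.append(current_y)
--
--         if (
--             (current_x == 0 and direction == -1 and current_y != ny-1) or
--             ( current_x == nx-1 and direction == 1)):
--
--             current_y += 1
--             direction = -direction
--         elif(
--             (current_y == 0 and direction == 1) or
--             ( current_y == ny-1 and direction == -1)):
--
--             current_x += 1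
--             direction = -direction
--
--         else:
--             current_x+=direction
--             current_y-=direction
--
--
--     return x,y
-- ===== SOURCE B (Python) =====
-- def zig_zag_index(nx, ny):
--     x = []
--     y = []
--     if nx > 0 and ny > 0:
--         for s in range(nx + ny - 1):
--             lo = max(0, s - (ny - 1))
--             hi = min(s, nx - 1)
--             r = range(lo, hi + 1) if s % 2 == 0 else range(hi, lo - 1, -1)
--             for cx in r:
--                 x.append(cx)
--                 y.append(s - cx)
--     return x, y
-- ===== Notes on version B (the rewrite author's own statement) =====
-- stated objective: alternative
-- what changed: Replaces the single stateful zig-zag walk with direction flips by a stateless loop over anti-diagonals s, emitting each diagonal's clamped x-range in increasing order for even s and decreasing order for odd s.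
import Mathlib
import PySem

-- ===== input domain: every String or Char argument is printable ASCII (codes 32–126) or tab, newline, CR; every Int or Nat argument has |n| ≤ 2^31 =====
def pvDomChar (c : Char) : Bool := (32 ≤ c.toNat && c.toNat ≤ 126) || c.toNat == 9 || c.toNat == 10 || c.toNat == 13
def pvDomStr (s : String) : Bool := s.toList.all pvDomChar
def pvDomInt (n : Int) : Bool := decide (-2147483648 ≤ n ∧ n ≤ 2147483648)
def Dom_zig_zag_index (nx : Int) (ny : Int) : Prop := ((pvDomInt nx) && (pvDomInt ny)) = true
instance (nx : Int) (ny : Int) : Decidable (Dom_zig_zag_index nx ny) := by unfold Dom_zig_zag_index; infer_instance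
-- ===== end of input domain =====

-- B replaces A's single stateful zig-zag walk (direction flips) by a stateless loop over
-- anti-diagonals, emitting each diagonal's clamped x-range in parity-chosen order; same cost.

-- ===== PORT A =====
-- fuel bound for the while-loop (a termination bound only; the loop checks Python's condition each step)
def zzLo (ny s : Int) : Int := max 0 (s - (ny - 1))
def zzHi (nx s : Int) : Int := min s (nx - 1)

def zzFuel (nx ny : Int) : Nat → Int → Nat
  | 0, _ => 0
  | n+1, s => (zzHi nx s - zzLo ny s + 1).toNat + zzFuel nx ny n (s+1)

def zzLoop (nx ny : Int) (cx cy d : Int) : Nat → List Int × List Int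
  | 0 => ([], [])
  | fuel+1 =>
    if cx < nx ∧ cy < ny then
      let rest :=
        if (cx = 0 ∧ d = -1 ∧ cy ≠ ny - 1) ∨ (cx = nx - 1 ∧ d = 1) then
          zzLoop nx ny cx (cy + 1) (-d) fuel
        else if (cy = 0 ∧ d = 1) ∨ (cy = ny - 1 ∧ d = -1) then
          zzLoop nx ny (cx + 1) cy (-d) fuel
        else
          zzLoop nx ny (cx + d) (cy - d) d fuel
      (cx :: rest.1, cy :: rest.2)
    else ([], [])

def zig_zag_index (nx : Int) (ny : Int) : List Int × List Int :=
  zzLoop nx ny 0 0 1 (if 0 < nx ∧ 0 < ny then zzFuel nx ny (nx + ny - 1).toNat 0 else 0)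

-- ===== PORT B =====
def zig_zag_index_alt (nx : Int) (ny : Int) : List Int × List Int :=
  if 0 < nx ∧ 0 < ny then
    (PySem.List.pyRange 0 (nx + ny - 1) 1).foldl (fun acc s =>
      let lo := max 0 (s - (ny - 1))
      let hi := min s (nx - 1)
      let r := if PySem.Int.mod s 2 = 0 then PySem.List.pyRange lo (hi + 1) 1
               else PySem.List.pyRange hi (lo - 1) (-1)
      r.foldl (fun acc2 cx => (acc2.1 ++ [cx], acc2.2 ++ [s - cx])) acc)
    ([], [])
  else ([], [])

-- ===== PRECONDITION & SPEC =====
def Spec_zig_zag_index (nx : Int) (ny : Int) (out : List Int × List Int) : Prop := out = zig_zag_index_alt nx ny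
instance (nx : Int) (ny : Int) (out : List Int × List Int) : Decidable (Spec_zig_zag_index nx ny out) := by unfold Spec_zig_zag_index; infer_instance

-- ===== CLAIM (what is proved, stated in full; the proofs are below) =====
def Claim_equal_zig_zag_index : Prop := ∀ (nx : Int) (ny : Int), Dom_zig_zag_index nx ny → Spec_zig_zag_index nx ny (zig_zag_index nx ny)

-- ===== LEMMAS AND PROOFS =====

-- the x-coordinates of anti-diagonal s in visit order, and the tail of the output from diagonal s on
def zzDiag (nx ny s : Int) : List Int :=
  if PySem.Int.mod s 2 = 0 then PySem.List.pyRange (zzLo ny s) (zzHi nx s + 1) 1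
  else PySem.List.pyRange (zzHi nx s) (zzLo ny s - 1) (-1)

def zzDiags (nx ny : Int) : Nat → Int → List Int × List Int
  | 0, _ => ([], [])
  | n+1, s =>
    let xs := zzDiag nx ny s
    let rest := zzDiags nx ny n (s+1)
    (xs ++ rest.1, xs.map (s - ·) ++ rest.2)

lemma foldl_pair (r : List Int) (s : Int) : ∀ acc : List Int × List Int,
    r.foldl (fun acc2 cx => (acc2.1 ++ [cx], acc2.2 ++ [s - cx])) acc
      = (acc.1 ++ r, acc.2 ++ r.map (s - ·)) := by
  induction r with
  | nil => intro acc; simp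
  | cons h t ih => intro acc; simp [List.foldl, ih]

lemma altFold (nx ny : Int) : ∀ (n : Nat) (s : Int) (acc : List Int × List Int),
    (nx + ny - 1 - s).toNat = n →
    (PySem.List.pyRange s (nx + ny - 1) 1).foldl (fun acc s =>
      let lo := max 0 (s - (ny - 1))
      let hi := min s (nx - 1)
      let r := if PySem.Int.mod s 2 = 0 then PySem.List.pyRange lo (hi + 1) 1
               else PySem.List.pyRange hi (lo - 1) (-1)
      r.foldl (fun acc2 cx => (acc2.1 ++ [cx], acc2.2 ++ [s - cx])) acc) acc
      = (acc.1 ++ (zzDiags nx ny n s).1, acc.2 ++ (zzDiags nx ny n s).2) := by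
  intro n
  induction n with
  | zero =>
    intro s acc hn
    rw [PySem.List.pyRange_one_eq_nil (by omega)]
    simp [zzDiags]
  | succ n ih =>
    intro s acc hn
    rw [PySem.List.pyRange_one_cons (by omega)]
    simp only [List.foldl_cons]
    rw [foldl_pair]
    rw [ih (s+1) _ (by omega)]
    simp [zzDiags, zzDiag, zzLo, zzHi]

lemma zzLoop_even (nx ny : Int) (hnx : 0 < nx) (hny : 0 < ny) :
    ∀ (k : Nat) (s cx : Int) (fuel : Nat), 0 ≤ s → s ≤ nx + ny - 2 →
    cx = zzHi nx s - k → zzLo ny s ≤ cx →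
    zzLoop nx ny cx (s - cx) 1 (k + fuel + 1) =
      (PySem.List.pyRange cx (zzHi nx s + 1) 1
         ++ (zzLoop nx ny (zzHi nx (s+1)) (s + 1 - zzHi nx (s+1)) (-1) fuel).1,
       (PySem.List.pyRange cx (zzHi nx s + 1) 1).map (s - ·)
         ++ (zzLoop nx ny (zzHi nx (s+1)) (s + 1 - zzHi nx (s+1)) (-1) fuel).2) := by
  intro k
  induction k with
  | zero =>
    intro s cx fuel hs hs2 hcx hlo
    have hHI : zzHi nx s = min s (nx - 1) := rfl
    have hLO : zzLo ny s = max 0 (s - (ny - 1)) := rfl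
    rw [hHI] at hcx; rw [hLO] at hlo
    simp only [Nat.cast_zero, sub_zero] at hcx
    have hcond : cx < nx ∧ s - cx < ny := by omega
    have hsing : PySem.List.pyRange cx (zzHi nx s + 1) 1 = [cx] := by
      rw [hHI, ← hcx]; exact PySem.List.pyRange_one_singleton cx
    rw [Nat.zero_add]
    simp only [zzLoop]
    rw [if_pos hcond, hsing]
    by_cases hc : cx = nx - 1
    · have hG1 : (cx = 0 ∧ (1:Int) = -1 ∧ s - cx ≠ ny - 1) ∨ (cx = nx - 1 ∧ True) :=
        Or.inr ⟨hc, trivial⟩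
      rw [if_pos hG1]
      have e1 : zzHi nx (s+1) = cx := by rw [zzHi]; omega
      rw [e1]
      have e2 : s + 1 - cx = s - cx + 1 := by ring
      rw [e2]
      simp
    · have hG1 : ¬ ((cx = 0 ∧ (1:Int) = -1 ∧ s - cx ≠ ny - 1) ∨ (cx = nx - 1 ∧ True)) := by
        rintro (⟨-, h, -⟩ | ⟨h, -⟩) <;> omega
      have hG2 : (s - cx = 0 ∧ True) ∨ (s - cx = ny - 1 ∧ (1:Int) = -1) :=
        Or.inl ⟨by omega, trivial⟩
      rw [if_neg hG1, if_pos hG2]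
      have e1 : zzHi nx (s+1) = cx + 1 := by rw [zzHi]; omega
      rw [e1]
      have e2 : s + 1 - (cx + 1) = s - cx := by ring
      rw [e2]
      simp
  | succ k ih =>
    intro s cx fuel hs hs2 hcx hlo
    have hHI : zzHi nx s = min s (nx - 1) := rfl
    have hLO : zzLo ny s = max 0 (s - (ny - 1)) := rfl
    rw [hHI] at hcx; rw [hLO] at hlo
    push_cast at hcx
    have hcond : cx < nx ∧ s - cx < ny := by omega
    have harith : (k + 1) + fuel + 1 = (k + fuel + 1) + 1 := by omega
    have ihx := ih s (cx + 1) fuel hs hs2 (by rw [hHI]; push_cast; omega) (by rw [hLO]; omega)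
    have e : s - (cx + 1) = s - cx - 1 := by ring
    rw [e] at ihx
    rw [harith]
    generalize hgen : k + fuel + 1 = m at ihx ⊢
    simp only [zzLoop]
    have hG1 : ¬ ((cx = 0 ∧ (1:Int) = -1 ∧ s - cx ≠ ny - 1) ∨ (cx = nx - 1 ∧ True)) := by
      rintro (⟨-, h, -⟩ | ⟨h, -⟩) <;> omega
    have hG2 : ¬ ((s - cx = 0 ∧ True) ∨ (s - cx = ny - 1 ∧ (1:Int) = -1)) := by
      rintro (⟨h, -⟩ | ⟨-, h⟩) <;> omega
    rw [if_pos hcond, if_neg hG1, if_neg hG2, ihx]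
    rw [PySem.List.pyRange_one_cons (show cx < zzHi nx s + 1 by rw [hHI]; omega)]
    simp

lemma zzLoop_odd (nx ny : Int) (hnx : 0 < nx) (hny : 0 < ny) :
    ∀ (k : Nat) (s cx : Int) (fuel : Nat), 0 ≤ s → s ≤ nx + ny - 2 →
    cx = zzLo ny s + k → cx ≤ zzHi nx s →
    zzLoop nx ny cx (s - cx) (-1) (k + fuel + 1) =
      (PySem.List.pyRange cx (zzLo ny s - 1) (-1)
         ++ (zzLoop nx ny (zzLo ny (s+1)) (s + 1 - zzLo ny (s+1)) 1 fuel).1,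
       (PySem.List.pyRange cx (zzLo ny s - 1) (-1)).map (s - ·)
         ++ (zzLoop nx ny (zzLo ny (s+1)) (s + 1 - zzLo ny (s+1)) 1 fuel).2) := by
  intro k
  induction k with
  | zero =>
    intro s cx fuel hs hs2 hcx hhi
    have hHI : zzHi nx s = min s (nx - 1) := rfl
    have hLO : zzLo ny s = max 0 (s - (ny - 1)) := rfl
    rw [hLO] at hcx; rw [hHI] at hhi
    simp only [Nat.cast_zero, add_zero] at hcx
    have hcond : cx < nx ∧ s - cx < ny := by omega
    have hsing : PySem.List.pyRange cx (zzLo ny s - 1) (-1) = [cx] := by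
      rw [hLO, ← hcx, PySem.List.pyRange_neg_one_cons (by omega),
        PySem.List.pyRange_neg_one_eq_nil (by omega)]
    rw [Nat.zero_add]
    simp only [zzLoop]
    rw [if_pos hcond, hsing]
    by_cases hc : cx = 0 ∧ s - cx ≠ ny - 1
    · have hG1 : (cx = 0 ∧ True ∧ s - cx ≠ ny - 1) ∨ (cx = nx - 1 ∧ (-1:Int) = 1) :=
        Or.inl ⟨hc.1, trivial, hc.2⟩
      rw [if_pos hG1]
      have e1 : zzLo ny (s+1) = cx := by rw [zzLo]; omega
      rw [e1]
      have e2 : s + 1 - cx = s - cx + 1 := by ring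
      rw [e2]
      simp
    · have hG1 : ¬ ((cx = 0 ∧ True ∧ s - cx ≠ ny - 1) ∨ (cx = nx - 1 ∧ (-1:Int) = 1)) := by
        rintro (⟨h0, -, h2⟩ | ⟨-, h⟩)
        · exact hc ⟨h0, h2⟩
        · omega
      have hG2 : (s - cx = 0 ∧ (-1:Int) = 1) ∨ (s - cx = ny - 1 ∧ True) :=
        Or.inr ⟨by omega, trivial⟩
      rw [if_neg hG1, if_pos hG2]
      have e1 : zzLo ny (s+1) = cx + 1 := by rw [zzLo]; omega
      rw [e1]
      have e2 : s + 1 - (cx + 1) = s - cx := by ring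
      rw [e2]
      simp
  | succ k ih =>
    intro s cx fuel hs hs2 hcx hhi
    have hHI : zzHi nx s = min s (nx - 1) := rfl
    have hLO : zzLo ny s = max 0 (s - (ny - 1)) := rfl
    rw [hLO] at hcx; rw [hHI] at hhi
    push_cast at hcx
    have hcond : cx < nx ∧ s - cx < ny := by omega
    have harith : (k + 1) + fuel + 1 = (k + fuel + 1) + 1 := by omega
    have ihx := ih s (cx - 1) fuel hs hs2 (by rw [hLO]; push_cast; omega) (by rw [hHI]; omega)
    have e : s - (cx - 1) = s - cx - -1 := by ring
    rw [e] at ihx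
    rw [harith]
    generalize hgen : k + fuel + 1 = m at ihx ⊢
    simp only [zzLoop]
    have hG1 : ¬ ((cx = 0 ∧ True ∧ s - cx ≠ ny - 1) ∨ (cx = nx - 1 ∧ (-1:Int) = 1)) := by
      rintro (⟨h, -, -⟩ | ⟨-, h⟩) <;> omega
    have hG2 : ¬ ((s - cx = 0 ∧ (-1:Int) = 1) ∨ (s - cx = ny - 1 ∧ True)) := by
      rintro (⟨-, h⟩ | ⟨h, -⟩) <;> omega
    rw [if_pos hcond, if_neg hG1, if_neg hG2]
    have e0 : cx + -1 = cx - 1 := by ring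
    rw [e0, ihx]
    rw [PySem.List.pyRange_neg_one_cons (show zzLo ny s - 1 < cx by rw [hLO]; omega)]
    simp

def zzEntry (nx ny s : Int) : Int :=
  if PySem.Int.mod s 2 = 0 then zzLo ny s else zzHi nx s

def zzDir (s : Int) : Int := if PySem.Int.mod s 2 = 0 then 1 else -1

lemma zzLoop_diags (nx ny : Int) (hnx : 0 < nx) (hny : 0 < ny) :
    ∀ (n : Nat) (s : Int), 0 ≤ s → (nx + ny - 1 - s).toNat = n →
    zzLoop nx ny (zzEntry nx ny s) (s - zzEntry nx ny s) (zzDir s) (zzFuel nx ny n s)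
      = zzDiags nx ny n s := by
  intro n
  induction n with
  | zero => intro s hs hn; rfl
  | succ n ih =>
    intro s hs hn
    have hs2 : s ≤ nx + ny - 2 := by omega
    have hm : PySem.Int.mod s 2 = s % 2 := PySem.Int.mod_eq_emod_of_pos (by norm_num)
    have hm' : PySem.Int.mod (s+1) 2 = (s+1) % 2 := PySem.Int.mod_eq_emod_of_pos (by norm_num)
    have hle : zzLo ny s ≤ zzHi nx s := by rw [zzLo, zzHi]; omega
    have hfuel : zzFuel nx ny (n+1) s
        = (zzHi nx s - zzLo ny s).toNat + zzFuel nx ny n (s+1) + 1 := by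
      rw [zzFuel]; omega
    by_cases hpar : PySem.Int.mod s 2 = 0
    · -- even diagonal: enter at the low end, direction +1
      have hpar' : ¬ PySem.Int.mod (s+1) 2 = 0 := by rw [hm, hm'] at *; omega
      simp only [zzEntry, zzDir, if_pos hpar]
      rw [hfuel, zzLoop_even nx ny hnx hny (zzHi nx s - zzLo ny s).toNat s (zzLo ny s)
        (zzFuel nx ny n (s+1)) hs hs2 (by omega) le_rfl]
      have ih' := ih (s+1) (by omega) (by omega)
      simp only [zzEntry, zzDir, if_neg hpar'] at ih'
      rw [ih']
      conv_rhs => rw [zzDiags]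
      rw [zzDiag, if_pos hpar]
    · -- odd diagonal: enter at the high end, direction -1
      have hpar' : PySem.Int.mod (s+1) 2 = 0 := by rw [hm, hm'] at *; omega
      simp only [zzEntry, zzDir, if_neg hpar]
      rw [hfuel, zzLoop_odd nx ny hnx hny (zzHi nx s - zzLo ny s).toNat s (zzHi nx s)
        (zzFuel nx ny n (s+1)) hs hs2 (by omega) le_rfl]
      have ih' := ih (s+1) (by omega) (by omega)
      simp only [zzEntry, zzDir, if_pos hpar'] at ih'
      rw [ih']
      conv_rhs => rw [zzDiags]
      rw [zzDiag, if_neg hpar]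

lemma zzLoop_empty (nx ny : Int) (h : ¬ (0 < nx ∧ 0 < ny)) :
    ∀ fuel, zzLoop nx ny 0 0 1 fuel = ([], []) := by
  intro fuel
  cases fuel with
  | zero => simp [zzLoop]
  | succ f => simp only [zzLoop]; rw [if_neg h]

-- ===== VERDICT (by name: the statement is the Claim_ definition above) =====
theorem zig_zag_index_spec : Claim_equal_zig_zag_index := by
  intro nx ny _
  unfold Spec_zig_zag_index zig_zag_index zig_zag_index_alt
  by_cases h : 0 < nx ∧ 0 < ny
  · rw [if_pos h, if_pos h]
    rw [altFold nx ny (nx + ny - 1).toNat 0 ([], []) (by omega)]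
    have he : zzEntry nx ny 0 = 0 := by
      simp [zzEntry, zzLo, PySem.Int.mod]
      omega
    have hd : zzDir 0 = 1 := by simp [zzDir, PySem.Int.mod]
    have := zzLoop_diags nx ny h.1 h.2 (nx + ny - 1).toNat 0 le_rfl (by omega)
    rw [he, hd] at this
    simpa using this
  · rw [if_neg h, if_neg h]
    exact zzLoop_empty nx ny h 0
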